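-- pv_equiv track=rewrite | github.com/UltraRepo/builder | rebrand/reposchema/repo-schema.py | extract_php_summary
-- ===== SOURCE A (Python) =====
-- def extract_php_summary(content):
--     """Extract summary for PHP language files"""
--     summary_parts = []
--
--     try:
--         lines = content.split('\n')
--         namespaces = []
--         uses = []
--         classes = []
--         functions = []
--         interfaces = []
--
--         for i, line in enumerate(lines):
--             line = line.strip()
--             if not line or line.startswith('//') or line.startswith('#'):
--                 continue
--
--             # Extract namespace
--             if line.startswith('namespace ') and len(namespaces) < 1:
--                 ns = line.split('namespace ')[1].split(';')[0]
--                 namespaces.append(ns)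
--
--             # Extract use statements
--             elif line.startswith('use ') and len(uses) < 4:
--                 use_path = line.split('use ')[1].split(';')[0]
--                 uses.append(use_path)
--
--             # Extract class definitions
--             elif line.startswith(('class ', 'abstract class ', 'final class ')) and len(classes) < 3:
--                 class_line = line.replace('abstract ', '').replace('final ', '').split('class ')[1]
--                 class_name = class_line.split()[0]
--                 classes.append(f"class {class_name}")
--
--             # Extract function definitions
--             elif line.startswith(('function ', 'public function ', 'private function ', 'protected function ')) and len(functions) < 4:
--                 func_line = line.replace('public ', '').replace('private ', '').replace('protected ', '').split('function ')[1]
--                 func_name = func_line.split('(')[0].strip()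
--                 functions.append(f"function {func_name}")
--
--             # Extract interface definitions
--             elif line.startswith('interface ') and len(interfaces) < 2:
--                 interface_name = line.split('interface ')[1].split()[0]
--                 interfaces.append(f"interface {interface_name}")
--
--         # Build summary
--         if namespaces:
--             summary_parts.append(f"Namespace: {namespaces[0]}")
--         if uses:
--             summary_parts.append(f"Uses: {', '.join(uses[:4])}")
--         if classes:
--             summary_parts.append(f"Classes: {', '.join(classes)}")
--         if functions:
--             summary_parts.append(f"Functions: {', '.join(functions[:4])}")
--         if interfaces:
--             summary_parts.append(f"Interfaces: {', '.join(interfaces)}")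
--
--         summary_parts.append("PHP")
--
--     except Exception as e:
--         return f"PHP file (parsing error: {str(e)[:30]})"
--
--     return ' | '.join(summary_parts) if summary_parts else "PHP module"
-- ===== SOURCE B (Python) =====
-- def _clean_lines(content):
--     """Stripped lines with blanks and //- or #-comment lines removed."""
--     out = []
--     for raw in content.split('\n'):
--         line = raw.strip()
--         if line and not line.startswith('//') and not line.startswith('#'):
--             out.append(line)
--     return out
--
--
-- def _collect(lines, cap, pred, extract):
--     """Collect extract(line) for the first `cap` lines satisfying pred."""
--     res = []
--     for line in lines:
--         if len(res) >= cap: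
--             break
--         if pred(line):
--             res.append(extract(line))
--     return res
--
--
-- def extract_php_summary(content):
--     """Extract summary for PHP language files"""
--     try:
--         lines = _clean_lines(content)
--         namespaces = _collect(lines, 1,
--                               lambda l: l.startswith('namespace '),
--                               lambda l: l.split('namespace ')[1].split(';')[0])
--         uses = _collect(lines, 4,
--                         lambda l: l.startswith('use '),
--                         lambda l: l.split('use ')[1].split(';')[0])
--         classes = _collect(lines, 3,
--                            lambda l: l.startswith(('class ', 'abstract class ', 'final class ')),
--                            lambda l: "class " + l.replace('abstract ', '').replace('final ', '').split('class ')[1].split()[0])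
--         functions = _collect(lines, 4,
--                              lambda l: l.startswith(('function ', 'public function ', 'private function ', 'protected function ')),
--                              lambda l: "function " + l.replace('public ', '').replace('private ', '').replace('protected ', '').split('function ')[1].split('(')[0].strip())
--         interfaces = _collect(lines, 2,
--                               lambda l: l.startswith('interface '),
--                               lambda l: "interface " + l.split('interface ')[1].split()[0])
--
--         parts = (
--             (["Namespace: " + namespaces[0]] if namespaces else [])
--             + (["Uses: " + ', '.join(uses)] if uses else [])
--             + (["Classes: " + ', '.join(classes)] if classes else [])
--             + (["Functions: " + ', '.join(functions)] if functions else [])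
--             + (["Interfaces: " + ', '.join(interfaces)] if interfaces else [])
--             + ["PHP"]
--         )
--         return ' | '.join(parts)
--     except Exception as e:
--         return f"PHP file (parsing error: {str(e)[:30]})"
-- ===== Notes on version B (the rewrite author's own statement) =====
-- stated objective: alternative
-- what changed: Replaces the single five-branch elif loop over raw lines with one comment/blank-filtering pass followed by five independent capped collection passes (a generic collect-up-to-N helper per category), correct because the five prefix tests are mutually exclusive; the summary is assembled by list concatenation instead of sequential appends.
import Mathlib
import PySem

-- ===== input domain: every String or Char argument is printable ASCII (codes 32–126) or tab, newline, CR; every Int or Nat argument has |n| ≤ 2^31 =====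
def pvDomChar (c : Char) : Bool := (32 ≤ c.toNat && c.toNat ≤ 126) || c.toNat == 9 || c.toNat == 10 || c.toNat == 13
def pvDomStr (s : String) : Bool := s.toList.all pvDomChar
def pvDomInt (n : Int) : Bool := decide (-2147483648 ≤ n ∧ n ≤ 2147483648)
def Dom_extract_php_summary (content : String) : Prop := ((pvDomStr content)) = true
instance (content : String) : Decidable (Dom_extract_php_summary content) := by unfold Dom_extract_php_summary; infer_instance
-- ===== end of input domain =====

-- B replaces A's single five-branch elif loop by one comment-filtering pass plus five
-- independent capped collection passes (alternative decomposition, same exact output).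

-- ===== PORT A =====
-- Shared per-line pieces: the very same string expressions occur verbatim in both Pythons.
-- s.split(sep) for the NON-EMPTY literal separators used below: split? is `some` there, exact.
def phpSplit (s sep : String) : List String := (PySem.Str.split? s sep).getD []

def phpNsP (l : String) : Bool := PySem.Str.startswith l "namespace "
def phpUseP (l : String) : Bool := PySem.Str.startswith l "use "
def phpClassP (l : String) : Bool :=
  PySem.Str.startswith l "class " || PySem.Str.startswith l "abstract class " ||
    PySem.Str.startswith l "final class "
def phpFnP (l : String) : Bool :=
  PySem.Str.startswith l "function " || PySem.Str.startswith l "public function " ||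
    PySem.Str.startswith l "private function " || PySem.Str.startswith l "protected function "
def phpIfaceP (l : String) : Bool := PySem.Str.startswith l "interface "

-- the [1]/[0] indexings may raise IndexError in Python: Option, none = IndexError
def phpNsX (l : String) : Option String := do
  let a ← PySem.List.pyGet? (phpSplit l "namespace ") 1
  PySem.List.pyGet? (phpSplit a ";") 0
def phpUseX (l : String) : Option String := do
  let a ← PySem.List.pyGet? (phpSplit l "use ") 1
  PySem.List.pyGet? (phpSplit a ";") 0
def phpClassX (l : String) : Option String := do
  let a ← PySem.List.pyGet?
    (phpSplit (PySem.Str.replace (PySem.Str.replace l "abstract " "") "final " "") "class ") 1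
  let nm ← PySem.List.pyGet? (PySem.Str.split₀ a) 0
  pure ("class " ++ nm)
def phpFnX (l : String) : Option String := do
  let a ← PySem.List.pyGet?
    (phpSplit (PySem.Str.replace (PySem.Str.replace
      (PySem.Str.replace l "public " "") "private " "") "protected " "") "function ") 1
  let nm ← PySem.List.pyGet? (phpSplit a "(") 0
  pure ("function " ++ PySem.Str.strip nm)
def phpIfaceX (l : String) : Option String := do
  let a ← PySem.List.pyGet? (phpSplit l "interface ") 1
  let nm ← PySem.List.pyGet? (PySem.Str.split₀ a) 0
  pure ("interface " ++ nm)

-- `if not line or line.startswith('//') or line.startswith('#'): continue`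
def phpSkipL (line : String) : Bool :=
  (line == "") || PySem.Str.startswith line "//" || PySem.Str.startswith line "#"

-- A's loop body; none = an exception escaped to the except-branch
def phpStep (acc : Option (List String × List String × List String × List String × List String))
    (raw : String) :
    Option (List String × List String × List String × List String × List String) :=
  match acc with
  | none => none
  | some (ns, us, cs, fs, ifs) =>
    let line := PySem.Str.strip raw
    if phpSkipL line then some (ns, us, cs, fs, ifs)
    else if phpNsP line && decide (ns.length < 1) then
      match phpNsX line with
      | some v => some (ns ++ [v], us, cs, fs, ifs)
      | none => none
    else if phpUseP line && decide (us.length < 4) then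
      match phpUseX line with
      | some v => some (ns, us ++ [v], cs, fs, ifs)
      | none => none
    else if phpClassP line && decide (cs.length < 3) then
      match phpClassX line with
      | some v => some (ns, us, cs ++ [v], fs, ifs)
      | none => none
    else if phpFnP line && decide (fs.length < 4) then
      match phpFnX line with
      | some v => some (ns, us, cs, fs ++ [v], ifs)
      | none => none
    else if phpIfaceP line && decide (ifs.length < 2) then
      match phpIfaceX line with
      | some v => some (ns, us, cs, fs, ifs ++ [v])
      | none => none
    else some (ns, us, cs, fs, ifs)

-- the only exception reachable is IndexError; str(e) = "list index out of range" (23 ≤ 30 chars)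
def phpErr : String := "PHP file (parsing error: list index out of range)"

def extract_php_summary (content : String) : String :=
  match (phpSplit content "\n").foldl phpStep (some ([], [], [], [], [])) with
  | none => phpErr
  | some (ns, us, cs, fs, ifs) =>
    let parts : List String := []
    let parts := if ns == [] then parts else parts ++ ["Namespace: " ++ ns.headD ""]
    let parts := if us == [] then parts
      else parts ++ ["Uses: " ++ PySem.Str.join ", " (PySem.List.slice us none (some 4))]
    let parts := if cs == [] then parts else parts ++ ["Classes: " ++ PySem.Str.join ", " cs]
    let parts := if fs == [] then parts
      else parts ++ ["Functions: " ++ PySem.Str.join ", " (PySem.List.slice fs none (some 4))]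
    let parts := if ifs == [] then parts
      else parts ++ ["Interfaces: " ++ PySem.Str.join ", " ifs]
    let parts := parts ++ ["PHP"]
    if parts == [] then "PHP module" else PySem.Str.join " | " parts

-- ===== PORT B =====
-- _clean_lines: stripped lines with blanks and //-/#-comment lines removed
def phpCleanLines : List String → List String
  | [] => []
  | raw :: ls =>
    let line := PySem.Str.strip raw
    if phpSkipL line then phpCleanLines ls else line :: phpCleanLines ls

-- _collect: first `cap` extractions from lines satisfying p (none = IndexError escaped)
def phpCollect (cap : Nat) (p : String → Bool) (f : String → Option String) :
    List String → List String → Option (List String)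
  | [], res => some res
  | l :: ls, res =>
    if cap ≤ res.length then some res
    else if p l then
      match f l with
      | some v => phpCollect cap p f ls (res ++ [v])
      | none => none
    else phpCollect cap p f ls res

def extract_php_summary_alt (content : String) : String :=
  let lines := phpCleanLines (phpSplit content "\n")
  match phpCollect 1 phpNsP phpNsX lines [], phpCollect 4 phpUseP phpUseX lines [],
        phpCollect 3 phpClassP phpClassX lines [], phpCollect 4 phpFnP phpFnX lines [],
        phpCollect 2 phpIfaceP phpIfaceX lines [] with
  | some ns, some us, some cs, some fs, some ifs =>
    let parts :=
      (if ns == [] then [] else ["Namespace: " ++ ns.headD ""]) ++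
      (if us == [] then [] else ["Uses: " ++ PySem.Str.join ", " us]) ++
      (if cs == [] then [] else ["Classes: " ++ PySem.Str.join ", " cs]) ++
      (if fs == [] then [] else ["Functions: " ++ PySem.Str.join ", " fs]) ++
      (if ifs == [] then [] else ["Interfaces: " ++ PySem.Str.join ", " ifs]) ++ ["PHP"]
    PySem.Str.join " | " parts
  | _, _, _, _, _ => "PHP file (parsing error: list index out of range)"

-- ===== PRECONDITION & SPEC =====
def Spec_extract_php_summary (content : String) (out : String) : Prop := out = extract_php_summary_alt content
instance (content : String) (out : String) : Decidable (Spec_extract_php_summary content out) := by unfold Spec_extract_php_summary; infer_instance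

-- ===== CLAIM (what is proved, stated in full; the proofs are below) =====
def Claim_equal_extract_php_summary : Prop := ∀ (content : String), Dom_extract_php_summary content → Spec_extract_php_summary content (extract_php_summary content)

-- ===== LEMMAS AND PROOFS =====

lemma foldl_phpStep_none (ls : List String) : ls.foldl phpStep none = none := by
  induction ls with
  | nil => rfl
  | cons l ls ih => simpa [phpStep] using ih

lemma collect_stop {cap : Nat} {p : String → Bool} {f : String → Option String}
    {ls res : List String} (h : cap ≤ res.length) : phpCollect cap p f ls res = some res := by
  cases ls <;> simp [phpCollect, h]

lemma collect_skip {cap : Nat} {p : String → Bool} {f : String → Option String}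
    {l : String} {ls res : List String} (h : p l = false) :
    phpCollect cap p f (l :: ls) res = phpCollect cap p f ls res := by
  by_cases hcap : cap ≤ res.length
  · rw [collect_stop hcap, collect_stop hcap]
  · simp [phpCollect, hcap, h]

lemma collect_len {cap : Nat} {p : String → Bool} {f : String → Option String} :
    ∀ {ls res r : List String}, phpCollect cap p f ls res = some r → res.length ≤ cap →
      r.length ≤ cap := by
  intro ls
  induction ls with
  | nil => intro res r h hle; simp [phpCollect] at h; exact h ▸ hle
  | cons l ls ih =>
    intro res r h hle
    by_cases hcap : cap ≤ res.length
    · rw [collect_stop hcap] at h; cases h; exact hle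
    · simp only [phpCollect, if_neg hcap] at h
      by_cases hp : p l = true
      · rw [if_pos hp] at h
        cases hf : f l with
        | none => rw [hf] at h; cases h
        | some v =>
          rw [hf] at h
          exact ih h (by simp; omega)
      · rw [if_neg hp] at h; exact ih h hle

-- two startswith tests with incomparable prefixes cannot both hold
lemma sw_excl (l p q : String) (h1 : ¬ (p.toList <+: q.toList)) (h2 : ¬ (q.toList <+: p.toList))
    (hp : PySem.Str.startswith l p = true) : PySem.Str.startswith l q = false := by
  rw [PySem.Str.startswith_eq, ← Bool.not_eq_true, PySem.Chars.startswith_iff]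
  rw [PySem.Str.startswith_eq, PySem.Chars.startswith_iff] at hp
  intro hq
  rcases List.prefix_or_prefix_of_prefix hp hq with h | h
  · exact h1 h
  · exact h2 h

lemma ns_excl {l : String} (h : phpNsP l = true) :
    phpUseP l = false ∧ phpClassP l = false ∧ phpFnP l = false ∧ phpIfaceP l = false := by
  unfold phpNsP at h
  unfold phpUseP phpClassP phpFnP phpIfaceP
  simp only [Bool.or_eq_false_iff]
  exact ⟨sw_excl _ _ _ (by decide) (by decide) h,
    ⟨⟨sw_excl _ _ _ (by decide) (by decide) h, sw_excl _ _ _ (by decide) (by decide) h⟩,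
      sw_excl _ _ _ (by decide) (by decide) h⟩,
    ⟨⟨⟨sw_excl _ _ _ (by decide) (by decide) h, sw_excl _ _ _ (by decide) (by decide) h⟩,
      sw_excl _ _ _ (by decide) (by decide) h⟩, sw_excl _ _ _ (by decide) (by decide) h⟩,
    sw_excl _ _ _ (by decide) (by decide) h⟩

lemma use_excl {l : String} (h : phpUseP l = true) :
    phpNsP l = false ∧ phpClassP l = false ∧ phpFnP l = false ∧ phpIfaceP l = false := by
  unfold phpUseP at h
  unfold phpNsP phpClassP phpFnP phpIfaceP
  simp only [Bool.or_eq_false_iff]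
  exact ⟨sw_excl _ _ _ (by decide) (by decide) h,
    ⟨⟨sw_excl _ _ _ (by decide) (by decide) h, sw_excl _ _ _ (by decide) (by decide) h⟩,
      sw_excl _ _ _ (by decide) (by decide) h⟩,
    ⟨⟨⟨sw_excl _ _ _ (by decide) (by decide) h, sw_excl _ _ _ (by decide) (by decide) h⟩,
      sw_excl _ _ _ (by decide) (by decide) h⟩, sw_excl _ _ _ (by decide) (by decide) h⟩,
    sw_excl _ _ _ (by decide) (by decide) h⟩

lemma cls_excl {l : String} (h : phpClassP l = true) :
    phpNsP l = false ∧ phpUseP l = false ∧ phpFnP l = false ∧ phpIfaceP l = false := by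
  unfold phpClassP at h
  simp only [Bool.or_eq_true] at h
  unfold phpNsP phpUseP phpFnP phpIfaceP
  simp only [Bool.or_eq_false_iff]
  rcases h with (h | h) | h <;>
    exact ⟨sw_excl _ _ _ (by decide) (by decide) h, sw_excl _ _ _ (by decide) (by decide) h,
      ⟨⟨⟨sw_excl _ _ _ (by decide) (by decide) h, sw_excl _ _ _ (by decide) (by decide) h⟩,
        sw_excl _ _ _ (by decide) (by decide) h⟩, sw_excl _ _ _ (by decide) (by decide) h⟩,
      sw_excl _ _ _ (by decide) (by decide) h⟩

lemma fn_excl {l : String} (h : phpFnP l = true) :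
    phpNsP l = false ∧ phpUseP l = false ∧ phpClassP l = false ∧ phpIfaceP l = false := by
  unfold phpFnP at h
  simp only [Bool.or_eq_true] at h
  unfold phpNsP phpUseP phpClassP phpIfaceP
  simp only [Bool.or_eq_false_iff]
  rcases h with ((h | h) | h) | h <;>
    exact ⟨sw_excl _ _ _ (by decide) (by decide) h, sw_excl _ _ _ (by decide) (by decide) h,
      ⟨⟨sw_excl _ _ _ (by decide) (by decide) h, sw_excl _ _ _ (by decide) (by decide) h⟩,
        sw_excl _ _ _ (by decide) (by decide) h⟩,
      sw_excl _ _ _ (by decide) (by decide) h⟩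

lemma iface_excl {l : String} (h : phpIfaceP l = true) :
    phpNsP l = false ∧ phpUseP l = false ∧ phpClassP l = false ∧ phpFnP l = false := by
  unfold phpIfaceP at h
  unfold phpNsP phpUseP phpClassP phpFnP
  simp only [Bool.or_eq_false_iff]
  exact ⟨sw_excl _ _ _ (by decide) (by decide) h, sw_excl _ _ _ (by decide) (by decide) h,
    ⟨⟨sw_excl _ _ _ (by decide) (by decide) h, sw_excl _ _ _ (by decide) (by decide) h⟩,
      sw_excl _ _ _ (by decide) (by decide) h⟩,
    ⟨⟨⟨sw_excl _ _ _ (by decide) (by decide) h, sw_excl _ _ _ (by decide) (by decide) h⟩,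
      sw_excl _ _ _ (by decide) (by decide) h⟩, sw_excl _ _ _ (by decide) (by decide) h⟩⟩

-- the heart: A's combined fold = B's five independent passes over the cleaned lines
lemma foldl_eq_collects :
    ∀ (ls ns us cs fs ifs : List String),
      ls.foldl phpStep (some (ns, us, cs, fs, ifs)) =
        (match phpCollect 1 phpNsP phpNsX (phpCleanLines ls) ns,
               phpCollect 4 phpUseP phpUseX (phpCleanLines ls) us,
               phpCollect 3 phpClassP phpClassX (phpCleanLines ls) cs,
               phpCollect 4 phpFnP phpFnX (phpCleanLines ls) fs,
               phpCollect 2 phpIfaceP phpIfaceX (phpCleanLines ls) ifs with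
         | some a, some b, some c, some d, some e => some (a, b, c, d, e)
         | _, _, _, _, _ => none) := by
  intro ls
  induction ls with
  | nil => intro ns us cs fs ifs; simp [phpCleanLines, phpCollect]
  | cons raw ls ih =>
    intro ns us cs fs ifs
    rw [List.foldl_cons]
    by_cases hskip : phpSkipL (PySem.Str.strip raw) = true
    · have hstep : phpStep (some (ns, us, cs, fs, ifs)) raw = some (ns, us, cs, fs, ifs) := by
        simp [phpStep, hskip]
      have hcl : phpCleanLines (raw :: ls) = phpCleanLines ls := by
        simp [phpCleanLines, hskip]
      rw [hstep, hcl]; exact ih ns us cs fs ifs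
    · rw [Bool.not_eq_true] at hskip
      have hcl : phpCleanLines (raw :: ls) = PySem.Str.strip raw :: phpCleanLines ls := by
        simp [phpCleanLines, hskip]
      rw [hcl]
      set line := PySem.Str.strip raw with hline
      by_cases hns : phpNsP line = true
      · obtain ⟨e1, e2, e3, e4⟩ := ns_excl hns
        rw [collect_skip e1, collect_skip e2, collect_skip e3, collect_skip e4]
        by_cases hlen : ns.length < 1
        · cases hx : phpNsX line with
          | none =>
            have hstep : phpStep (some (ns, us, cs, fs, ifs)) raw = none := by
              simp [phpStep, hskip, ← hline, hns, hlen, hx]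
            have hcoll : phpCollect 1 phpNsP phpNsX (line :: phpCleanLines ls) ns = none := by
              have : ¬ (1 ≤ ns.length) := by omega
              simp [phpCollect, this, hns, hx]
            rw [hstep, hcoll, foldl_phpStep_none]
          | some v =>
            have hstep : phpStep (some (ns, us, cs, fs, ifs)) raw
                = some (ns ++ [v], us, cs, fs, ifs) := by
              simp [phpStep, hskip, ← hline, hns, hlen, hx]
            have hcoll : phpCollect 1 phpNsP phpNsX (line :: phpCleanLines ls) ns
                = phpCollect 1 phpNsP phpNsX (phpCleanLines ls) (ns ++ [v]) := by
              have : ¬ (1 ≤ ns.length) := by omega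
              simp [phpCollect, this, hns, hx]
            rw [hstep, hcoll]; exact ih (ns ++ [v]) us cs fs ifs
        · have hfull : 1 ≤ ns.length := by omega
          have hstep : phpStep (some (ns, us, cs, fs, ifs)) raw = some (ns, us, cs, fs, ifs) := by
            simp [phpStep, hskip, ← hline, hns, hlen, e1, e2, e3, e4]
          have hcoll : phpCollect 1 phpNsP phpNsX (line :: phpCleanLines ls) ns
              = phpCollect 1 phpNsP phpNsX (phpCleanLines ls) ns := by
            rw [collect_stop hfull, collect_stop hfull]
          rw [hstep, hcoll]; exact ih ns us cs fs ifs
      · rw [Bool.not_eq_true] at hns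
        by_cases huse : phpUseP line = true
        · obtain ⟨e1, e2, e3, e4⟩ := use_excl huse
          rw [collect_skip e1, collect_skip e2, collect_skip e3, collect_skip e4]
          by_cases hlen : us.length < 4
          · cases hx : phpUseX line with
            | none =>
              have hstep : phpStep (some (ns, us, cs, fs, ifs)) raw = none := by
                simp [phpStep, hskip, ← hline, hns, huse, hlen, hx]
              have hcoll : phpCollect 4 phpUseP phpUseX (line :: phpCleanLines ls) us = none := by
                have : ¬ (4 ≤ us.length) := by omega
                simp [phpCollect, this, huse, hx]
              rw [hstep, hcoll, foldl_phpStep_none]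
              cases phpCollect 1 phpNsP phpNsX (phpCleanLines ls) ns <;> rfl
            | some v =>
              have hstep : phpStep (some (ns, us, cs, fs, ifs)) raw
                  = some (ns, us ++ [v], cs, fs, ifs) := by
                simp [phpStep, hskip, ← hline, hns, huse, hlen, hx]
              have hcoll : phpCollect 4 phpUseP phpUseX (line :: phpCleanLines ls) us
                  = phpCollect 4 phpUseP phpUseX (phpCleanLines ls) (us ++ [v]) := by
                have : ¬ (4 ≤ us.length) := by omega
                simp [phpCollect, this, huse, hx]
              rw [hstep, hcoll]; exact ih ns (us ++ [v]) cs fs ifs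
          · have hfull : 4 ≤ us.length := by omega
            have hstep : phpStep (some (ns, us, cs, fs, ifs)) raw
                = some (ns, us, cs, fs, ifs) := by
              simp [phpStep, hskip, ← hline, hns, huse, hlen, e2, e3, e4]
            have hcoll : phpCollect 4 phpUseP phpUseX (line :: phpCleanLines ls) us
                = phpCollect 4 phpUseP phpUseX (phpCleanLines ls) us := by
              rw [collect_stop hfull, collect_stop hfull]
            rw [hstep, hcoll]; exact ih ns us cs fs ifs
        · rw [Bool.not_eq_true] at huse
          by_cases hcls : phpClassP line = true
          · obtain ⟨e1, e2, e3, e4⟩ := cls_excl hcls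
            rw [collect_skip e1, collect_skip e2, collect_skip e3, collect_skip e4]
            by_cases hlen : cs.length < 3
            · cases hx : phpClassX line with
              | none =>
                have hstep : phpStep (some (ns, us, cs, fs, ifs)) raw = none := by
                  simp [phpStep, hskip, ← hline, hns, huse, hcls, hlen, hx]
                have hcoll :
                    phpCollect 3 phpClassP phpClassX (line :: phpCleanLines ls) cs = none := by
                  have : ¬ (3 ≤ cs.length) := by omega
                  simp [phpCollect, this, hcls, hx]
                rw [hstep, hcoll, foldl_phpStep_none]
                cases phpCollect 1 phpNsP phpNsX (phpCleanLines ls) ns <;>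
                  cases phpCollect 4 phpUseP phpUseX (phpCleanLines ls) us <;> rfl
              | some v =>
                have hstep : phpStep (some (ns, us, cs, fs, ifs)) raw
                    = some (ns, us, cs ++ [v], fs, ifs) := by
                  simp [phpStep, hskip, ← hline, hns, huse, hcls, hlen, hx]
                have hcoll : phpCollect 3 phpClassP phpClassX (line :: phpCleanLines ls) cs
                    = phpCollect 3 phpClassP phpClassX (phpCleanLines ls) (cs ++ [v]) := by
                  have : ¬ (3 ≤ cs.length) := by omega
                  simp [phpCollect, this, hcls, hx]
                rw [hstep, hcoll]; exact ih ns us (cs ++ [v]) fs ifs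
            · have hfull : 3 ≤ cs.length := by omega
              have hstep : phpStep (some (ns, us, cs, fs, ifs)) raw
                  = some (ns, us, cs, fs, ifs) := by
                simp [phpStep, hskip, ← hline, hns, huse, hcls, hlen, e3, e4]
              have hcoll : phpCollect 3 phpClassP phpClassX (line :: phpCleanLines ls) cs
                  = phpCollect 3 phpClassP phpClassX (phpCleanLines ls) cs := by
                rw [collect_stop hfull, collect_stop hfull]
              rw [hstep, hcoll]; exact ih ns us cs fs ifs
          · rw [Bool.not_eq_true] at hcls
            by_cases hfn : phpFnP line = true
            · obtain ⟨e1, e2, e3, e4⟩ := fn_excl hfn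
              rw [collect_skip e1, collect_skip e2, collect_skip e3, collect_skip e4]
              by_cases hlen : fs.length < 4
              · cases hx : phpFnX line with
                | none =>
                  have hstep : phpStep (some (ns, us, cs, fs, ifs)) raw = none := by
                    simp [phpStep, hskip, ← hline, hns, huse, hcls, hfn, hlen, hx]
                  have hcoll :
                      phpCollect 4 phpFnP phpFnX (line :: phpCleanLines ls) fs = none := by
                    have : ¬ (4 ≤ fs.length) := by omega
                    simp [phpCollect, this, hfn, hx]
                  rw [hstep, hcoll, foldl_phpStep_none]
                  cases phpCollect 1 phpNsP phpNsX (phpCleanLines ls) ns <;>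
                    cases phpCollect 4 phpUseP phpUseX (phpCleanLines ls) us <;>
                      cases phpCollect 3 phpClassP phpClassX (phpCleanLines ls) cs <;> rfl
                | some v =>
                  have hstep : phpStep (some (ns, us, cs, fs, ifs)) raw
                      = some (ns, us, cs, fs ++ [v], ifs) := by
                    simp [phpStep, hskip, ← hline, hns, huse, hcls, hfn, hlen, hx]
                  have hcoll : phpCollect 4 phpFnP phpFnX (line :: phpCleanLines ls) fs
                      = phpCollect 4 phpFnP phpFnX (phpCleanLines ls) (fs ++ [v]) := by
                    have : ¬ (4 ≤ fs.length) := by omega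
                    simp [phpCollect, this, hfn, hx]
                  rw [hstep, hcoll]; exact ih ns us cs (fs ++ [v]) ifs
              · have hfull : 4 ≤ fs.length := by omega
                have hstep : phpStep (some (ns, us, cs, fs, ifs)) raw
                    = some (ns, us, cs, fs, ifs) := by
                  simp [phpStep, hskip, ← hline, hns, huse, hcls, hfn, hlen, e4]
                have hcoll : phpCollect 4 phpFnP phpFnX (line :: phpCleanLines ls) fs
                    = phpCollect 4 phpFnP phpFnX (phpCleanLines ls) fs := by
                  rw [collect_stop hfull, collect_stop hfull]
                rw [hstep, hcoll]; exact ih ns us cs fs ifs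
            · rw [Bool.not_eq_true] at hfn
              by_cases hif : phpIfaceP line = true
              · obtain ⟨e1, e2, e3, e4⟩ := iface_excl hif
                rw [collect_skip e1, collect_skip e2, collect_skip e3, collect_skip e4]
                by_cases hlen : ifs.length < 2
                · cases hx : phpIfaceX line with
                  | none =>
                    have hstep : phpStep (some (ns, us, cs, fs, ifs)) raw = none := by
                      simp [phpStep, hskip, ← hline, hns, huse, hcls, hfn, hif, hlen, hx]
                    have hcoll :
                        phpCollect 2 phpIfaceP phpIfaceX (line :: phpCleanLines ls) ifs
                          = none := by
                      have : ¬ (2 ≤ ifs.length) := by omega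
                      simp [phpCollect, this, hif, hx]
                    rw [hstep, hcoll, foldl_phpStep_none]
                    cases phpCollect 1 phpNsP phpNsX (phpCleanLines ls) ns <;>
                      cases phpCollect 4 phpUseP phpUseX (phpCleanLines ls) us <;>
                        cases phpCollect 3 phpClassP phpClassX (phpCleanLines ls) cs <;>
                          cases phpCollect 4 phpFnP phpFnX (phpCleanLines ls) fs <;> rfl
                  | some v =>
                    have hstep : phpStep (some (ns, us, cs, fs, ifs)) raw
                        = some (ns, us, cs, fs, ifs ++ [v]) := by
                      simp [phpStep, hskip, ← hline, hns, huse, hcls, hfn, hif, hlen, hx]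
                    have hcoll : phpCollect 2 phpIfaceP phpIfaceX (line :: phpCleanLines ls) ifs
                        = phpCollect 2 phpIfaceP phpIfaceX (phpCleanLines ls) (ifs ++ [v]) := by
                      have : ¬ (2 ≤ ifs.length) := by omega
                      simp [phpCollect, this, hif, hx]
                    rw [hstep, hcoll]; exact ih ns us cs fs (ifs ++ [v])
                · have hfull : 2 ≤ ifs.length := by omega
                  have hstep : phpStep (some (ns, us, cs, fs, ifs)) raw
                      = some (ns, us, cs, fs, ifs) := by
                    simp [phpStep, hskip, ← hline, hns, huse, hcls, hfn, hif, hlen]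
                  have hcoll : phpCollect 2 phpIfaceP phpIfaceX (line :: phpCleanLines ls) ifs
                      = phpCollect 2 phpIfaceP phpIfaceX (phpCleanLines ls) ifs := by
                    rw [collect_stop hfull, collect_stop hfull]
                  rw [hstep, hcoll]; exact ih ns us cs fs ifs
              · rw [Bool.not_eq_true] at hif
                have hstep : phpStep (some (ns, us, cs, fs, ifs)) raw
                    = some (ns, us, cs, fs, ifs) := by
                  simp [phpStep, hskip, ← hline, hns, huse, hcls, hfn, hif]
                rw [hstep, collect_skip hns, collect_skip huse, collect_skip hcls,
                  collect_skip hfn, collect_skip hif]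
                exact ih ns us cs fs ifs

-- ===== VERDICT (by name: the statement is the Claim_ definition above) =====
theorem extract_php_summary_spec : Claim_equal_extract_php_summary := by
  intro content _hdom
  simp only [Spec_extract_php_summary, extract_php_summary, extract_php_summary_alt]
  rw [foldl_eq_collects]
  cases h1 : phpCollect 1 phpNsP phpNsX (phpCleanLines (phpSplit content "\n")) [] with
  | none => rfl
  | some a =>
    cases h2 : phpCollect 4 phpUseP phpUseX (phpCleanLines (phpSplit content "\n")) [] with
    | none => rfl
    | some b =>
      cases h3 : phpCollect 3 phpClassP phpClassX (phpCleanLines (phpSplit content "\n")) [] with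
      | none => rfl
      | some c =>
        cases h4 : phpCollect 4 phpFnP phpFnX (phpCleanLines (phpSplit content "\n")) [] with
        | none => rfl
        | some d =>
          cases h5 : phpCollect 2 phpIfaceP phpIfaceX (phpCleanLines (phpSplit content "\n")) [] with
          | none => rfl
          | some e =>
            have hb : b.length ≤ 4 := collect_len h2 (by simp)
            have hd : d.length ≤ 4 := collect_len h4 (by simp)
            have hsb : PySem.List.slice b none (some 4) = b := by
              rw [PySem.List.slice_to (α := String) b (b := 4) (by norm_num)]
              exact List.take_of_length_le (by simpa using hb)
            have hsd : PySem.List.slice d none (some 4) = d := by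
              rw [PySem.List.slice_to (α := String) d (b := 4) (by norm_num)]
              exact List.take_of_length_le (by simpa using hd)
            simp only [hsb, hsd]
            by_cases ha' : a = [] <;> by_cases hb' : b = [] <;> by_cases hc' : c = [] <;>
              by_cases hd' : d = [] <;> by_cases he' : e = [] <;>
                simp [ha', hb', hc', hd', he']
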